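-- pv_equiv track=rewrite | github.com/jl-wynen/exact-hubbard | ana/spectrum.py | collect_degenerates
-- ===== SOURCE A (Python) =====
-- from collections import Counter
--
-- def collect_degenerates(spectrum):
--     q_to_e = dict()
--     for charge, energy in spectrum:
--         if charge in q_to_e:
--             q_to_e[charge].append(energy)
--         else:
--             q_to_e[charge] = [energy]
--
--     q_to_e = {charge: Counter(energies) for charge, energies in q_to_e.items()}
--     charges, energies = zip(*sorted(q_to_e.items(), key=lambda t: t[0]))
--     return charges, energies
-- ===== SOURCE B (Python) =====
-- from collections import Counter
--
--
-- def collect_degenerates(spectrum):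
--     charges = sorted({charge for charge, _ in spectrum})
--     energies = tuple(Counter(e for q, e in spectrum if q == c) for c in charges)
--     return tuple(charges), energies
-- ===== Notes on version B (the rewrite author's own statement) =====
-- stated objective: simpler
-- what changed: B replaces A's dict-accumulation (grow per-charge lists in a dict, re-wrap into Counters, sort the items, unzip) by directly sorting the set of charges and building each charge's Counter from a filter of the original list.
-- crash fix: On the empty spectrum A raises ValueError (unpacking zip of no groups); B returns the pair of two empty tuples. — e.g. on collect_degenerates([]): A raises ValueError, B returns ([], [])
import Mathlib
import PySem

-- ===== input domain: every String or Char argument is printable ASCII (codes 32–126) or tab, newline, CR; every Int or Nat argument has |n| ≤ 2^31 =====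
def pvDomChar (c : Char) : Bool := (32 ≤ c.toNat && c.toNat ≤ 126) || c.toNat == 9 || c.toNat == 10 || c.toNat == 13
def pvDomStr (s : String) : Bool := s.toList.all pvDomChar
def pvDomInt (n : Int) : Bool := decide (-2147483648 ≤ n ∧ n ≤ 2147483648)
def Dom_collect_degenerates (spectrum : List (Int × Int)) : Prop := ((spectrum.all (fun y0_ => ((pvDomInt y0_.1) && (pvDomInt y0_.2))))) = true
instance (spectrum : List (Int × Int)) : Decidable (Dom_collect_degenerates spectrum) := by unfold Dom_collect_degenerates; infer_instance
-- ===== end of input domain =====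

-- B groups by sorting the distinct charges and filtering the input per charge, instead of A's
-- dict-of-lists accumulation followed by sorting the dict items; objective: simpler (not faster).

-- ===== PORT A =====
def collect_degenerates (spectrum : List (Int × Int)) : List Int × (List (List (Int × Int))) :=
  -- q_to_e = dict(); for charge, energy in spectrum: append or start a list
  let q_to_e : PySem.Dict Int (List Int) :=
    spectrum.foldl
      (fun d p =>
        if d.contains p.1 then d.modify p.1 [] (fun v => v ++ [p.2])
        else d.insert p.1 [p.2])
      PySem.Dict.empty
  -- {charge: Counter(energies) for charge, energies in q_to_e.items()}: keys of q_to_e are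
  -- already unique, so the dict comprehension's items are this map over q_to_e.items
  let q2 : List (Int × PySem.Dict Int Int) :=
    q_to_e.items.map (fun ce => (ce.1, PySem.Dict.counter ce.2))
  -- zip(*sorted(q_to_e.items(), key=lambda t: t[0]))
  let its := PySem.List.sorted q2 (fun t => t.1) false
  (its.map (fun t => t.1), its.map (fun t => (t.2).items))

-- ===== PORT B =====
def collect_degenerates_alt (spectrum : List (Int × Int)) : List Int × (List (List (Int × Int))) :=
  -- charges = sorted({charge for charge, _ in spectrum})
  let charges := PySem.List.sorted (PySem.Set.ofList (spectrum.map (fun p => p.1))) (fun x => x) false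
  -- energies = tuple(Counter(e for q, e in spectrum if q == c) for c in charges)
  let energies := charges.map (fun c =>
    (PySem.Dict.counter ((spectrum.filter (fun p => p.1 == c)).map (fun p => p.2))).items)
  (charges, energies)

-- ===== PRECONDITION & SPEC =====
-- A raises ValueError on the empty spectrum (zip of no groups fails to unpack); Pre_ excludes it.
def Pre_collect_degenerates (spectrum : List (Int × Int)) : Prop := spectrum ≠ []
instance (spectrum : List (Int × Int)) : Decidable (Pre_collect_degenerates spectrum) := by unfold Pre_collect_degenerates; infer_instance
def pvWitness_collect_degenerates : (List (Int × Int)) := [(0, 3), (1, 5), (0, 3)]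

-- On the empty spectrum A raises ValueError; B returns two empty tuples.
def Raises_collect_degenerates (spectrum : List (Int × Int)) : Prop := spectrum = []
instance (spectrum : List (Int × Int)) : Decidable (Raises_collect_degenerates spectrum) := by unfold Raises_collect_degenerates; infer_instance
def pvRaiseWitness_collect_degenerates : (List (Int × Int)) := []
def pvRaiseWitnessOut_collect_degenerates : List Int × (List (List (Int × Int))) := ([], [])

def Spec_collect_degenerates (spectrum : List (Int × Int)) (out : List Int × (List (List (Int × Int)))) : Prop := out = collect_degenerates_alt spectrum
instance (spectrum : List (Int × Int)) (out : List Int × (List (List (Int × Int)))) : Decidable (Spec_collect_degenerates spectrum out) := by unfold Spec_collect_degenerates; infer_instance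

-- ===== CLAIM (what is proved, stated in full; the proofs are below) =====
def Claim_equal_collect_degenerates : Prop := ∀ (spectrum : List (Int × Int)), Dom_collect_degenerates spectrum → Pre_collect_degenerates spectrum → Spec_collect_degenerates spectrum (collect_degenerates spectrum)
def Claim_raises_collect_degenerates : Prop := (∀ (spectrum : List (Int × Int)), Dom_collect_degenerates spectrum → Raises_collect_degenerates spectrum → ¬ Pre_collect_degenerates spectrum) ∧ (Dom_collect_degenerates (pvRaiseWitness_collect_degenerates) ∧ Raises_collect_degenerates (pvRaiseWitness_collect_degenerates) ∧ collect_degenerates_alt (pvRaiseWitness_collect_degenerates) = pvRaiseWitnessOut_collect_degenerates)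

-- ===== LEMMAS AND PROOFS =====

theorem cd_step_eq (d : PySem.Dict Int (List Int)) (p : Int × Int) :
    (if d.contains p.1 then d.modify p.1 [] (fun v => v ++ [p.2])
     else d.insert p.1 [p.2]) = d.modify p.1 [] (fun v => v ++ [p.2]) := by
  by_cases h : d.contains p.1
  · simp [h]
  · have h' : d.contains p.1 = false := by simpa using h
    simp [h', PySem.Dict.modify, PySem.Dict.insert, PySem.Dict.getD_of_not_contains]

theorem cd_main (spectrum : List (Int × Int)) :
    collect_degenerates spectrum = collect_degenerates_alt spectrum := by
  unfold collect_degenerates collect_degenerates_alt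
  simp only [cd_step_eq]
  set ds := spectrum.foldl (fun d p => d.modify p.1 [] (fun v => v ++ [p.2]))
      (PySem.Dict.empty : PySem.Dict Int (List Int)) with hds
  have hnodup : ds.keys.Nodup := by
    rw [hds]; exact PySem.Dict.nodup_keys_foldl_modify_key _ _ _ _ _ (by simp)
  have hkeys : ds.keys = PySem.Set.ofList (spectrum.map (fun p => p.1)) := by
    rw [hds, PySem.Dict.keys_foldl_modify_key]
    simp [PySem.Set.update_nil_left]
  have hgetD : ∀ c, ds.getD c [] = (spectrum.filter (fun p => p.1 == c)).map (fun p => p.2) := by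
    intro c; rw [hds, PySem.Dict.getD_foldl_modify_append]; simp
  have hq2 : ds.items.map (fun ce => (ce.1, PySem.Dict.counter ce.2))
      = (PySem.Set.ofList (spectrum.map (fun p => p.1))).map
          (fun c => (c, PySem.Dict.counter ((spectrum.filter (fun p => p.1 == c)).map (fun p => p.2)))) := by
    rw [PySem.Dict.items_eq_map_keys ds hnodup [], List.map_map, hkeys]
    exact List.map_congr_left (fun c _ => by simp [hgetD c])
  rw [hq2]
  have hsorted : PySem.List.sorted
      ((PySem.Set.ofList (spectrum.map (fun p => p.1))).map
        (fun c => (c, PySem.Dict.counter ((spectrum.filter (fun p => p.1 == c)).map (fun p => p.2)))))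
      (fun t => t.1) false
      = (PySem.List.sorted (PySem.Set.ofList (spectrum.map (fun p => p.1))) (fun x => x) false).map
          (fun c => (c, PySem.Dict.counter ((spectrum.filter (fun p => p.1 == c)).map (fun p => p.2)))) := by
    apply PySem.List.sorted_eq_of_perm_of_pairwise_lt
    · exact (PySem.List.sorted_perm _ _ _).map _
    · exact (PySem.List.sorted_ofList_pairwise_lt _).map _ (fun a b h => h)
  rw [hsorted]
  simp only [List.map_map, Function.comp_def]
  exact congrArg₂ Prod.mk (List.map_id' _) rfl

-- ===== VERDICT (by name: the statement is the Claim_ definition above) =====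
theorem collect_degenerates_spec : Claim_equal_collect_degenerates := by
  intro s _ _
  exact cd_main s

@[simp] theorem collect_degenerates_raises : Claim_raises_collect_degenerates := by
  unfold Claim_raises_collect_degenerates
  exact ⟨fun s _ h => by unfold Raises_collect_degenerates at h; simp [Pre_collect_degenerates, h], by decide⟩
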